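-- pv_equiv track=rewrite | github.com/Fuad-I/FooBar | test.py | get_gcd_table
-- ===== SOURCE A (Python) =====
-- def get_gcd_table(n):
--     table = [[0 for _ in range(n + 1)] for _ in range(n + 1)]
--     for i in range(1, n + 1):
--         for j in range(i, n + 1):
--             if i == 1 or j == 1:
--                 table[i][j] = 1
--                 table[j][i] = 1
--             elif i == j:
--                 table[i][j] = i
--             else:
--                 table[i][j] = table[i][j - i]
--                 table[j][i] = table[i][j - i]
--     return table
-- ===== SOURCE B (Python) =====
-- def get_gcd_table(n):
--     def gcd(a, b):
--         while b:
--             a, b = b, a % b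
--         return a
--     return [[gcd(i, j) if i and j else 0 for j in range(n + 1)]
--             for i in range(n + 1)]
-- ===== Notes on version B (the rewrite author's own statement) =====
-- stated objective: simpler
-- what changed: Replaces A's in-place dynamic programming over the table (subtractive recurrence table[i][j]=table[i][j-i] with symmetric writes and i==1/j==1/i==j special cases) by a direct per-cell closed-form Euclidean gcd computed independently in a nested comprehension.
import Mathlib
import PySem

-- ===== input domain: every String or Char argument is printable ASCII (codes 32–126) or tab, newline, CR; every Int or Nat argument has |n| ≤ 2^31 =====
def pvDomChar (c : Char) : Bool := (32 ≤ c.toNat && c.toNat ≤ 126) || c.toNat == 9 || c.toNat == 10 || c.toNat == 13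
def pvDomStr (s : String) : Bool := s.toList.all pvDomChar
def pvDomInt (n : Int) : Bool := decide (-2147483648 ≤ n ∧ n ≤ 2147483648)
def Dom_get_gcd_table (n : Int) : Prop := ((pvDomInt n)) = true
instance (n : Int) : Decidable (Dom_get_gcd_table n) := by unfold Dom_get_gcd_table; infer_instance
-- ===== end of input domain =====

-- B replaces A's in-place subtractive dynamic programming over the table by an
-- independent per-cell Euclidean gcd in a nested comprehension (objective: simpler).


-- ===== PORT A =====
-- table[i][j]  (exact here: every access in A uses in-range nonnegative indices)
def pyGet2 (t : List (List Int)) (i j : Int) : Int :=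
  PySem.List.pyGetD (PySem.List.pyGetD t i []) j 0

-- table[i][j] = v  (exact here: every write in A uses in-range nonnegative indices)
def pySet2 (t : List (List Int)) (i j v : Int) : List (List Int) :=
  PySem.List.pySetD t i (PySem.List.pySetD (PySem.List.pyGetD t i []) j v)

-- body of A's inner loop (the statements for one (i, j), in source order)
def innerStepA (i : Int) (t : List (List Int)) (j : Int) : List (List Int) :=
  if i = 1 ∨ j = 1 then
    pySet2 (pySet2 t i j 1) j i 1
  else if i = j then
    pySet2 t i j i
  else
    let t1 := pySet2 t i j (pyGet2 t i (j - i))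
    pySet2 t1 j i (pyGet2 t1 i (j - i))

def get_gcd_table (n : Int) : List (List Int) :=
  let table := (PySem.List.pyRange 0 (n + 1) 1).map
    (fun _ => (PySem.List.pyRange 0 (n + 1) 1).map (fun _ => (0 : Int)))
  (PySem.List.pyRange 1 (n + 1) 1).foldl
    (fun t i => (PySem.List.pyRange i (n + 1) 1).foldl (innerStepA i) t) table

-- ===== PORT B =====
-- Source B's local helper: while b: a, b = b, a % b; return a
def gcdAux (a b : Int) : Int :=
  if b = 0 then a else gcdAux b (PySem.Int.mod a b)
termination_by b.natAbs
decreasing_by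
  rcases lt_trichotomy b 0 with h1 | h1 | h1
  · have h2 := PySem.Int.mod_neg_bounds (a := a) h1
    omega
  · omega
  · have h2 := PySem.Int.mod_nonneg (a := a) h1
    have h3 := PySem.Int.mod_lt (a := a) h1
    omega

def get_gcd_table_alt (n : Int) : List (List Int) :=
  (PySem.List.pyRange 0 (n + 1) 1).map (fun i =>
    (PySem.List.pyRange 0 (n + 1) 1).map (fun j =>
      if i ≠ 0 ∧ j ≠ 0 then gcdAux i j else 0))

-- ===== PRECONDITION & SPEC =====
def Spec_get_gcd_table (n : Int) (out : List (List Int)) : Prop := out = get_gcd_table_alt n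
instance (n : Int) (out : List (List Int)) : Decidable (Spec_get_gcd_table n out) := by unfold Spec_get_gcd_table; infer_instance

-- ===== CLAIM (what is proved, stated in full; the proofs are below) =====
def Claim_equal_get_gcd_table : Prop := ∀ (n : Int), Dom_get_gcd_table n → Spec_get_gcd_table n (get_gcd_table n)

-- ===== LEMMAS AND PROOFS =====

-- functional model of the table: entry (i, j) is f i j
def Tab (m : Nat) (f : Nat → Nat → Int) : List (List Int) :=
  (List.range (m + 1)).map (fun i => (List.range (m + 1)).map (fun j => f i j))

def updF (f : Nat → Nat → Int) (i j : Nat) (v : Int) : Nat → Nat → Int :=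
  fun a b => if a = i ∧ b = j then v else f a b

-- functional mirror of innerStepA
def stepF (i j : Int) (f : Nat → Nat → Int) : Nat → Nat → Int :=
  if i = 1 ∨ j = 1 then
    updF (updF f i.toNat j.toNat 1) j.toNat i.toNat 1
  else if i = j then
    updF f i.toNat j.toNat i
  else
    let f1 := updF f i.toNat j.toNat (f i.toNat (j - i).toNat)
    updF f1 j.toNat i.toNat (f1 i.toNat (j - i).toNat)

lemma gcdAux_natCast (a b : Nat) : gcdAux (a : Int) (b : Int) = (Nat.gcd a b : Int) := by
  induction b using Nat.strong_induction_on generalizing a with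
  | _ b ih =>
    rw [gcdAux]
    by_cases hb : b = 0
    · simp [hb]
    · have hb' : ((b : Int) : Int) ≠ 0 := by exact_mod_cast hb
      rw [if_neg hb', PySem.Int.mod_natCast, ih (a % b) (Nat.mod_lt a (Nat.pos_of_ne_zero hb)),
        Nat.gcd_comm b (a % b), ← Nat.gcd_rec b a, Nat.gcd_comm b a]

lemma set_map_range {α : Type} (n i : Nat) (F : Nat → α) (y : α) (_hi : i < n) :
    ((List.range n).map F).set i y = (List.range n).map (fun k => if k = i then y else F k) := by
  apply List.ext_getElem
  · simp
  · intro k h1 h2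
    simp only [List.getElem_set, List.getElem_map, List.getElem_range]
    by_cases h : i = k
    · simp [h]
    · simp [h, Ne.symm h]

lemma pyGet2_Tab (m : Nat) (f : Nat → Nat → Int) (a b : Nat) (ha : a ≤ m) (hb : b ≤ m) :
    pyGet2 (Tab m f) (a : Int) (b : Int) = f a b := by
  have ha' : a < m + 1 := Nat.lt_succ_of_le ha
  have hb' : b < m + 1 := Nat.lt_succ_of_le hb
  simp [pyGet2, Tab, List.getD_eq_getElem?_getD, ha', hb']

lemma pySet2_Tab (m : Nat) (f : Nat → Nat → Int) (a b : Nat) (v : Int)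
    (ha : a ≤ m) (hb : b ≤ m) :
    pySet2 (Tab m f) (a : Int) (b : Int) v = Tab m (updF f a b v) := by
  have hrow : PySem.List.pyGetD (Tab m f) (a : Int) [] = (List.range (m + 1)).map (f a) := by
    simp [Tab, List.getD_eq_getElem?_getD, Nat.lt_succ_of_le ha]
  simp only [pySet2, hrow, PySem.List.pySetD_natCast]
  rw [set_map_range _ _ _ _ (Nat.lt_succ_of_le hb)]
  unfold Tab
  rw [set_map_range _ _ _ _ (Nat.lt_succ_of_le ha)]
  refine List.map_congr_left (fun i _ => ?_)
  by_cases hia : i = a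
  · subst hia
    rw [if_pos rfl]
    refine List.map_congr_left (fun j _ => ?_)
    by_cases hjb : j = b
    · simp [updF, hjb]
    · simp [updF, hjb]
  · simp only [if_neg hia]
    refine List.map_congr_left (fun j _ => ?_)
    simp [updF, hia]

lemma innerStepA_Tab (m i c : Nat) (f : Nat → Nat → Int)
    (h1 : 1 ≤ i) (hic : i ≤ c) (hcm : c ≤ m) :
    innerStepA (i : Int) (Tab m f) (c : Int) = Tab m (stepF (i : Int) (c : Int) f) := by
  have him : i ≤ m := le_trans hic hcm
  have hsub : ((c : Int) - (i : Int)) = ((c - i : Nat) : Int) := by omega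
  have hcim : c - i ≤ m := by omega
  simp only [innerStepA, stepF, hsub, Int.toNat_natCast]
  split_ifs with hA hB
  · rw [pySet2_Tab m f i c 1 him hcm, pySet2_Tab m _ c i 1 hcm him]
  · rw [pySet2_Tab m f i c _ him hcm]
  · rw [pyGet2_Tab m f i (c - i) him hcim, pySet2_Tab m f i c _ him hcm,
      pyGet2_Tab m _ i (c - i) him hcim, pySet2_Tab m _ c i _ hcm him]

-- cells already holding their final value after A has processed rows < i fully
-- and, in row i, columns j with i ≤ j < c
abbrev Done (i c a b : Nat) : Prop :=
  1 ≤ a ∧ 1 ≤ b ∧ (min a b < i ∨ (min a b = i ∧ max a b < c))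

def TblInv (m i c : Nat) (f : Nat → Nat → Int) : Prop :=
  ∀ a b : Nat, a ≤ m → b ≤ m → f a b = if Done i c a b then (Nat.gcd a b : Int) else 0

lemma step_inv (m i c : Nat) (h1 : 1 ≤ i) (hic : i ≤ c) (hcm : c ≤ m)
    (f : Nat → Nat → Int) (hf : TblInv m i c f) :
    TblInv m i (c + 1) (stepF (i : Int) (c : Int) f) := by
  have him : i ≤ m := le_trans hic hcm
  have hcim : c - i ≤ m := by omega
  intro a b ha hb
  simp only [stepF, Int.toNat_natCast,
    show ((c : Int) - (i : Int)).toNat = c - i from by omega,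
    show ((i : Int) = 1 ∨ (c : Int) = 1) ↔ (i = 1 ∨ c = 1) from by omega,
    show ((i : Int) = (c : Int)) ↔ i = c from by omega]
  by_cases hA : i = 1 ∨ c = 1
  · rw [if_pos hA]
    have hi1 : i = 1 := by omega
    have hg1 : Nat.gcd i c = 1 := by rw [hi1]; exact Nat.gcd_one_left c
    unfold updF
    by_cases hci : a = c ∧ b = i
    · rw [if_pos hci, if_pos (show Done i (c + 1) a b from by omega), hci.1, hci.2, hi1,
        Nat.gcd_one_right]
      simp
    · rw [if_neg hci]
      by_cases hicab : a = i ∧ b = c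
      · rw [if_pos hicab, if_pos (show Done i (c + 1) a b from by omega), hicab.1, hicab.2,
          hi1, Nat.gcd_one_left]
        simp
      · rw [if_neg hicab, hf a b ha hb]
        exact if_congr (by omega) rfl rfl
  · rw [if_neg hA]
    by_cases hB : i = c
    · rw [if_pos hB]
      unfold updF
      by_cases hab : a = i ∧ b = c
      · rw [if_pos hab, if_pos (show Done i (c + 1) a b from by omega), hab.1, hab.2, ← hB,
          Nat.gcd_self]
      · rw [if_neg hab, hf a b ha hb]
        exact if_congr (by omega) rfl rfl
    · rw [if_neg hB]
      have hlt : i < c := lt_of_le_of_ne hic hB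
      have hv : f i (c - i) = (Nat.gcd i (c - i) : Int) := by
        rw [hf i (c - i) him hcim, if_pos (show Done i c i (c - i) from by omega)]
      have hgcd : Nat.gcd i (c - i) = Nat.gcd i c := by
        rw [Nat.gcd_comm i (c - i), Nat.gcd_sub_self_left (le_of_lt hlt), Nat.gcd_comm]
      unfold updF
      have hread : (if i = i ∧ c - i = c then f i (c - i) else f i (c - i)) = f i (c - i) := by
        split <;> rfl
      by_cases hci : a = c ∧ b = i
      · rw [if_pos hci, hread, hv, hgcd, if_pos (show Done i (c + 1) a b from by omega),
          hci.1, hci.2, Nat.gcd_comm i c]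
      · rw [if_neg hci]
        by_cases hicab : a = i ∧ b = c
        · rw [if_pos hicab, hv, hgcd, if_pos (show Done i (c + 1) a b from by omega),
            hicab.1, hicab.2]
        · rw [if_neg hicab, hf a b ha hb]
          exact if_congr (by omega) rfl rfl

lemma inner_inv (m i : Nat) (h1 : 1 ≤ i) (_him : i ≤ m) :
    ∀ (d c : Nat), c + d = m + 1 → i ≤ c →
    ∀ f, TblInv m i c f →
    TblInv m i (m + 1) ((PySem.List.pyRange (c : Int) ((m : Int) + 1) 1).foldl
      (fun f j => stepF (i : Int) j f) f) := by
  intro d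
  induction d with
  | zero =>
    intro c hc hci f hf
    have hcm : c = m + 1 := by omega
    subst hcm
    rw [PySem.List.pyRange_one_eq_nil (by omega)]
    exact hf
  | succ d ih =>
    intro c hc hci f hf
    have hlt : ((c : Int)) < (m : Int) + 1 := by omega
    rw [PySem.List.pyRange_one_cons hlt, List.foldl_cons,
      show ((c : Int) + 1) = ((c + 1 : Nat) : Int) from by omega]
    exact ih (c + 1) (by omega) (by omega) _ (step_inv m i c h1 hci (by omega) f hf)

lemma foldl_Tab (m : Nat) (L : List Int)
    (sT : List (List Int) → Int → List (List Int))
    (sF : (Nat → Nat → Int) → Int → (Nat → Nat → Int))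
    (h : ∀ f x, x ∈ L → sT (Tab m f) x = Tab m (sF f x)) :
    ∀ f, L.foldl sT (Tab m f) = Tab m (L.foldl sF f) := by
  induction L with
  | nil => intro f; rfl
  | cons x L ih =>
      intro f
      simp only [List.foldl_cons, h f x List.mem_cons_self]
      exact ih (fun f y hy => h f y (List.mem_cons_of_mem _ hy)) _

lemma outer_inv (m : Nat) :
    ∀ (d k : Nat), k + d = m →
    ∀ f, TblInv m (k + 1) (k + 1) f →
    TblInv m (m + 1) (m + 1)
      ((PySem.List.pyRange ((k : Int) + 1) ((m : Int) + 1) 1).foldl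
        (fun f i => (PySem.List.pyRange i ((m : Int) + 1) 1).foldl
          (fun f j => stepF i j f) f) f) := by
  intro d
  induction d with
  | zero =>
    intro k hk f hf
    have hkm : k = m := by omega
    subst hkm
    rw [PySem.List.pyRange_one_eq_nil (by omega)]
    exact hf
  | succ d ih =>
    intro k hk f hf
    have hlt : ((k : Int) + 1) < (m : Int) + 1 := by omega
    rw [PySem.List.pyRange_one_cons hlt, List.foldl_cons,
      show ((k : Int) + 1) = ((k + 1 : Nat) : Int) from by omega]
    have hconv : ∀ g, TblInv m (k + 1) (m + 1) g → TblInv m (k + 2) (k + 2) g := by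
      intro g hg a b ha hb
      rw [hg a b ha hb]
      exact if_congr (by omega) rfl rfl
    exact ih (k + 1) (by omega) _
      (hconv _ (inner_inv m (k + 1) (by omega) (by omega) (m - k) (k + 1) (by omega)
        (by omega) f hf))

lemma A_eq_B_nonneg (m : Nat) : get_gcd_table (m : Int) = get_gcd_table_alt (m : Int) := by
  have hrange : PySem.List.pyRange 0 ((m : Int) + 1) 1
      = List.map (fun k : Nat => (k : Int)) (List.range (m + 1)) := by
    rw [PySem.List.pyRange_one]
    have : (((m : Int) + 1) - 0).toNat = m + 1 := by omega
    rw [this]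
    exact List.map_congr_left (fun k _ => by omega)
  have hinit : (PySem.List.pyRange 0 ((m : Int) + 1) 1).map
      (fun _ => (PySem.List.pyRange 0 ((m : Int) + 1) 1).map (fun _ => (0 : Int)))
      = Tab m (fun _ _ => 0) := by
    rw [hrange, List.map_map, List.map_map]
    rfl
  have hstep : ∀ f x, x ∈ PySem.List.pyRange 1 ((m : Int) + 1) 1 →
      (PySem.List.pyRange x ((m : Int) + 1) 1).foldl (innerStepA x) (Tab m f)
        = Tab m ((PySem.List.pyRange x ((m : Int) + 1) 1).foldl (fun f j => stepF x j f) f) := by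
    intro f x hx
    rw [PySem.List.mem_pyRange_one] at hx
    obtain ⟨i, rfl⟩ : ∃ i : Nat, x = (i : Int) := ⟨x.toNat, by omega⟩
    refine foldl_Tab m _ _ _ (fun g y hy => ?_) f
    rw [PySem.List.mem_pyRange_one] at hy
    obtain ⟨c, rfl⟩ : ∃ c : Nat, y = (c : Int) := ⟨y.toNat, by omega⟩
    exact innerStepA_Tab m i c g (by omega) (by omega) (by omega)
  have hA : get_gcd_table (m : Int)
      = Tab m ((PySem.List.pyRange 1 ((m : Int) + 1) 1).foldl
          (fun f i => (PySem.List.pyRange i ((m : Int) + 1) 1).foldl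
            (fun f j => stepF i j f) f) (fun _ _ => 0)) := by
    unfold get_gcd_table
    rw [hinit]
    exact foldl_Tab m _ _ _ hstep _
  have hzero : TblInv m 1 1 (fun _ _ => 0) := by
    intro a b ha hb
    rw [if_neg (by omega)]
  have hfin := outer_inv m m 0 (by omega) (fun _ _ => 0) (by simpa using hzero)
  rw [show (((0 : Nat) : Int) + 1) = (1 : Int) from by omega] at hfin
  have hB : get_gcd_table_alt (m : Int)
      = Tab m (fun a b => if 1 ≤ a ∧ 1 ≤ b then ((Nat.gcd a b : Nat) : Int) else 0) := by
    rw [get_gcd_table_alt, hrange, List.map_map]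
    refine List.map_congr_left (fun a hamem => ?_)
    simp only [Function.comp_apply]
    rw [List.map_map]
    refine List.map_congr_left (fun b hbmem => ?_)
    simp only [Function.comp_apply]
    rw [show (if ((a : Int) ≠ 0 ∧ (b : Int) ≠ 0) then gcdAux (a : Int) (b : Int) else (0 : Int))
        = if (1 ≤ a ∧ 1 ≤ b) then gcdAux (a : Int) (b : Int) else (0 : Int)
        from if_congr (by omega) rfl rfl]
    by_cases hab : 1 ≤ a ∧ 1 ≤ b
    · rw [if_pos hab, if_pos hab, gcdAux_natCast]
    · rw [if_neg hab, if_neg hab]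
  rw [hA, hB]
  unfold Tab
  refine List.map_congr_left (fun a hamem => ?_)
  rw [List.mem_range] at hamem
  refine List.map_congr_left (fun b hbmem => ?_)
  rw [List.mem_range] at hbmem
  rw [hfin a b (by omega) (by omega)]
  show (if Done (m + 1) (m + 1) a b then ((Nat.gcd a b : Nat) : Int) else 0)
      = if 1 ≤ a ∧ 1 ≤ b then ((Nat.gcd a b : Nat) : Int) else 0
  exact if_congr (by omega) rfl rfl

-- ===== VERDICT (by name: the statement is the Claim_ definition above) =====
theorem get_gcd_table_spec : Claim_equal_get_gcd_table := by
  intro n _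
  unfold Spec_get_gcd_table
  by_cases hn : 0 ≤ n
  · obtain ⟨m, rfl⟩ : ∃ m : Nat, n = (m : Int) := ⟨n.toNat, (Int.toNat_of_nonneg hn).symm⟩
    exact A_eq_B_nonneg m
  · have h0 : n + 1 ≤ 0 := by omega
    have h1 : n + 1 ≤ 1 := by omega
    simp [get_gcd_table, get_gcd_table_alt, PySem.List.pyRange_one_eq_nil h0,
      PySem.List.pyRange_one_eq_nil h1]
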